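-- pv_equiv track=rewrite | github.com/Thejshri-A/Python-1000 | 549. Wind Speed.py | wind_speed
-- ===== SOURCE A (Python) =====
-- def wind_speed(winds):
--     classify=[]
--     for wind in winds:
--         if wind<5:
--             classify.append("Calm")
--         elif wind<15:
--             classify.append("Moderate")
--         else:
--             classify.append("Strong")
--     return classify
-- ===== SOURCE B (Python) =====
-- import bisect
--
-- _BOUNDS = [5, 15]
-- _LABELS = ["Calm", "Moderate", "Strong"]
--
-- def wind_speed(winds):
--     return [_LABELS[bisect.bisect_right(_BOUNDS, wind)] for wind in winds]
-- ===== Notes on version B (the rewrite author's own statement) =====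
-- stated objective: idiomatic
-- what changed: Replaces the if/elif/else cascade with a sorted threshold table and a bisect_right binary-search lookup into a parallel label list, built as a comprehension instead of an append loop.
import Mathlib
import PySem

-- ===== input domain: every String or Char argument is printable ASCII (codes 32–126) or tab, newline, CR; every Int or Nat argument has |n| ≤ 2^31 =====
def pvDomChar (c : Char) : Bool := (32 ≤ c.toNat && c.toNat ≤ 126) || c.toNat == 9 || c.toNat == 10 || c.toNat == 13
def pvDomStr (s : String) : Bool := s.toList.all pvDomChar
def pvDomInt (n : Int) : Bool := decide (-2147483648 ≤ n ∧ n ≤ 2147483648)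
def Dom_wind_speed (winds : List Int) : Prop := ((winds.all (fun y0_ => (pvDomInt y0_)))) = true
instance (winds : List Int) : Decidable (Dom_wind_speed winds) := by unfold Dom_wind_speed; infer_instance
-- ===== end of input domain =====

-- B replaces A's if/elif/else cascade with a bisect_right lookup into a sorted threshold table (idiomatic, same cost).


-- ===== PORT A =====
def wind_speed (winds : List Int) : List String :=
  winds.foldl (fun classify wind =>
    if wind < 5 then classify ++ ["Calm"]
    else if wind < 15 then classify ++ ["Moderate"]
    else classify ++ ["Strong"]) []

-- ===== PORT B =====
def pvBounds : List Int := [5, 15]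
def pvLabels : List String := ["Calm", "Moderate", "Strong"]

def wind_speed_alt (winds : List Int) : List String :=
  winds.map (fun wind => pvLabels.getD (PySem.List.bisectRight pvBounds wind) "")

-- ===== PRECONDITION & SPEC =====
def Spec_wind_speed (winds : List Int) (out : List String) : Prop := out = wind_speed_alt winds
instance (winds : List Int) (out : List String) : Decidable (Spec_wind_speed winds out) := by unfold Spec_wind_speed; infer_instance

-- ===== CLAIM (what is proved, stated in full; the proofs are below) =====
def Claim_equal_wind_speed : Prop := ∀ (winds : List Int), Dom_wind_speed winds → Spec_wind_speed winds (wind_speed winds)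

-- ===== LEMMAS AND PROOFS =====
theorem pv_bisect_eq (w : Int) : PySem.List.bisectRight pvBounds w =
    (if w < 5 then 0 else if w < 15 then 1 else 2) := by
  obtain ⟨hk, hlo, hhi⟩ := PySem.List.bisectRight_spec pvBounds w (by norm_num [pvBounds])
  set k := PySem.List.bisectRight pvBounds w with hkdef
  have h0 := hlo 0 (by norm_num [pvBounds])
  have h1 := hlo 1 (by norm_num [pvBounds])
  have g0 := hhi 0 (by norm_num [pvBounds])
  have g1 := hhi 1 (by norm_num [pvBounds])
  simp only [pvBounds, List.length_cons, List.length_nil] at hk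
  simp only [pvBounds, List.getElem_cons_zero, List.getElem_cons_succ] at h0 h1 g0 g1
  split_ifs with hw1 hw2 <;> omega

theorem pv_classify_eq (w : Int) :
    (if w < 5 then "Calm" else if w < 15 then "Moderate" else "Strong")
      = pvLabels.getD (PySem.List.bisectRight pvBounds w) "" := by
  rw [pv_bisect_eq]
  split_ifs <;> rfl

-- ===== VERDICT (by name: the statement is the Claim_ definition above) =====
theorem wind_speed_spec : Claim_equal_wind_speed := by
  intro winds _
  show wind_speed winds = wind_speed_alt winds
  unfold wind_speed wind_speed_alt
  have : ∀ (acc : List String) (xs : List Int),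
      xs.foldl (fun classify wind =>
        if wind < 5 then classify ++ ["Calm"]
        else if wind < 15 then classify ++ ["Moderate"]
        else classify ++ ["Strong"]) acc
      = acc ++ xs.map (fun wind => pvLabels.getD (PySem.List.bisectRight pvBounds wind) "") := by
    intro acc xs
    induction xs generalizing acc with
    | nil => simp
    | cons x xs ih =>
      simp only [List.foldl_cons, List.map_cons]
      rw [ih]
      have h := pv_classify_eq x
      split_ifs at h ⊢ <;> rw [← h] <;> simp
  simpa using this [] winds
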